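-- pv_equiv track=rewrite | github.com/poojitha9908702071/chat_agent_for_personalized_clothing_networks | chat_agent/lightweight_chat_agent.py | _get_event_categories
-- ===== SOURCE A (Python) =====
-- from typing import Dict, Any, Optional, List
--
-- def _get_event_categories(gender: str, event_type: str) -> List[str]:
--     """Get recommended categories based on gender and event type"""
--
--     event_type_lower = event_type.lower()
--
--     if gender == 'women':
--         # Women's event-based recommendations
--         if any(keyword in event_type_lower for keyword in ['job', 'interview', 'office', 'meeting', 'work']):
--             return ['Western Wear', 'Tops and Co-ord Sets', 'Dresses']
--         elif any(keyword in event_type_lower for keyword in ['wedding', 'engagement', 'reception', 'marriage']):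
--             return ['Ethnic Wear', 'Dresses']
--         elif any(keyword in event_type_lower for keyword in ['birthday', 'party', 'night out', 'celebration', 'club']):
--             return ['Western Wear', 'Dresses', 'Tops and Co-ord Sets']
--         elif any(keyword in event_type_lower for keyword in ['college', 'daily', 'casual', 'university', 'school']):
--             return ['Tops and Co-ord Sets', 'Western Wear', 'Dresses']
--         elif any(keyword in event_type_lower for keyword in ['festival', 'diwali', 'pongal', 'navratri', 'eid', 'onam', 'traditional']):
--             return ['Ethnic Wear', 'Dresses']
--         elif any(keyword in event_type_lower for keyword in ['family', 'temple', 'religious', 'function']):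
--             return ['Ethnic Wear', 'Dresses']
--         elif any(keyword in event_type_lower for keyword in ['travel', 'trip', 'photoshoot', 'vacation', 'holiday']):
--             return ['Western Wear', 'Dresses', 'Tops and Co-ord Sets']
--         else:
--             # Default for women
--             return ['Western Wear', 'Dresses', 'Tops and Co-ord Sets']
--
--     else:  # men
--         # Men's event-based recommendations
--         if any(keyword in event_type_lower for keyword in ['job', 'interview', 'office', 'meeting', 'work']):
--             return ['Shirts']
--         elif any(keyword in event_type_lower for keyword in ['wedding', 'engagement', 'reception', 'marriage']):
--             return ['Shirts']
--         elif any(keyword in event_type_lower for keyword in ['party', 'celebration', 'night out', 'club']):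
--             return ['Shirts', 'T-shirts']
--         elif any(keyword in event_type_lower for keyword in ['college', 'daily', 'casual', 'university', 'school']):
--             return ['T-shirts', 'Shirts']
--         elif any(keyword in event_type_lower for keyword in ['festival', 'diwali', 'pongal', 'eid', 'onam', 'traditional']):
--             return ['Shirts']
--         elif any(keyword in event_type_lower for keyword in ['travel', 'trip', 'photoshoot', 'vacation', 'holiday']):
--             return ['Shirts', 'T-shirts']
--         else:
--             # Default for men
--             return ['Shirts', 'T-shirts']
-- ===== SOURCE B (Python) =====
-- def _entries(prio, cats, kws):
--     return [(kw, (prio, cats)) for kw in kws]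
--
-- _WOMEN_TABLE = (
--     _entries(0, ['Western Wear', 'Tops and Co-ord Sets', 'Dresses'], ['job', 'interview', 'office', 'meeting', 'work'])
--     + _entries(1, ['Ethnic Wear', 'Dresses'], ['wedding', 'engagement', 'reception', 'marriage'])
--     + _entries(2, ['Western Wear', 'Dresses', 'Tops and Co-ord Sets'], ['birthday', 'party', 'night out', 'celebration', 'club'])
--     + _entries(3, ['Tops and Co-ord Sets', 'Western Wear', 'Dresses'], ['college', 'daily', 'casual', 'university', 'school'])
--     + _entries(4, ['Ethnic Wear', 'Dresses'], ['festival', 'diwali', 'pongal', 'navratri', 'eid', 'onam', 'traditional'])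
--     + _entries(5, ['Ethnic Wear', 'Dresses'], ['family', 'temple', 'religious', 'function'])
--     + _entries(6, ['Western Wear', 'Dresses', 'Tops and Co-ord Sets'], ['travel', 'trip', 'photoshoot', 'vacation', 'holiday'])
-- )
-- _WOMEN_DEFAULT = ['Western Wear', 'Dresses', 'Tops and Co-ord Sets']
--
-- _MEN_TABLE = (
--     _entries(0, ['Shirts'], ['job', 'interview', 'office', 'meeting', 'work'])
--     + _entries(1, ['Shirts'], ['wedding', 'engagement', 'reception', 'marriage'])
--     + _entries(2, ['Shirts', 'T-shirts'], ['party', 'celebration', 'night out', 'club'])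
--     + _entries(3, ['T-shirts', 'Shirts'], ['college', 'daily', 'casual', 'university', 'school'])
--     + _entries(4, ['Shirts'], ['festival', 'diwali', 'pongal', 'eid', 'onam', 'traditional'])
--     + _entries(5, ['Shirts', 'T-shirts'], ['travel', 'trip', 'photoshoot', 'vacation', 'holiday'])
-- )
-- _MEN_DEFAULT = ['Shirts', 'T-shirts']
--
--
-- def _get_event_categories(gender: str, event_type: str) -> list:
--     """Priority map + exhaustive argmin scan: every keyword carries a priority; scan
--     the whole flat keyword table and keep the matched entry of minimal priority."""
--     low = event_type.lower()
--     table, default = (_WOMEN_TABLE, _WOMEN_DEFAULT) if gender == 'women' else (_MEN_TABLE, _MEN_DEFAULT)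
--     best = None
--     for kw, entry in table:
--         if kw in low and (best is None or entry[0] < best[0]):
--             best = entry
--     return best[1] if best is not None else default
-- ===== Notes on version B (the rewrite author's own statement) =====
-- stated objective: alternative
-- what changed: Replaced the short-circuiting if/elif cascade of per-rule any() tests with a flat keyword->(priority,categories) table scanned exhaustively once, keeping the matched entry of minimal priority (argmin) instead of returning at the first matching rule.
import Mathlib
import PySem

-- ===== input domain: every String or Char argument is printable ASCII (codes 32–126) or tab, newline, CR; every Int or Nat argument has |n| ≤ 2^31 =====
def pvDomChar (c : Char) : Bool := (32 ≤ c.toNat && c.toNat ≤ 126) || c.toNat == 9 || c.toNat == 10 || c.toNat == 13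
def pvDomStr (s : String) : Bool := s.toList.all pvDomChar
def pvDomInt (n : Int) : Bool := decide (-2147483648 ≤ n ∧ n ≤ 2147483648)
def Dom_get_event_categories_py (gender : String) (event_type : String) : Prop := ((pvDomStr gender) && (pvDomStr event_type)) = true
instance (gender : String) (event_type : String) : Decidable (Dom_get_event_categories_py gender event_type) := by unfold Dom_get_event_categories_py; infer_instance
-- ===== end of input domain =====

-- B replaces A's short-circuiting if/elif cascade by an exhaustive argmin scan over a flat
-- keyword -> (priority, categories) table (objective: alternative decomposition, same cost).

-- ===== PORT A =====
def get_event_categories_py (gender : String) (event_type : String) : List String :=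
  let event_type_lower := PySem.Str.lower event_type
  if gender == "women" then
    if ["job", "interview", "office", "meeting", "work"].any (fun k => PySem.Str.isIn k event_type_lower) then
      ["Western Wear", "Tops and Co-ord Sets", "Dresses"]
    else if ["wedding", "engagement", "reception", "marriage"].any (fun k => PySem.Str.isIn k event_type_lower) then
      ["Ethnic Wear", "Dresses"]
    else if ["birthday", "party", "night out", "celebration", "club"].any (fun k => PySem.Str.isIn k event_type_lower) then
      ["Western Wear", "Dresses", "Tops and Co-ord Sets"]
    else if ["college", "daily", "casual", "university", "school"].any (fun k => PySem.Str.isIn k event_type_lower) then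
      ["Tops and Co-ord Sets", "Western Wear", "Dresses"]
    else if ["festival", "diwali", "pongal", "navratri", "eid", "onam", "traditional"].any (fun k => PySem.Str.isIn k event_type_lower) then
      ["Ethnic Wear", "Dresses"]
    else if ["family", "temple", "religious", "function"].any (fun k => PySem.Str.isIn k event_type_lower) then
      ["Ethnic Wear", "Dresses"]
    else if ["travel", "trip", "photoshoot", "vacation", "holiday"].any (fun k => PySem.Str.isIn k event_type_lower) then
      ["Western Wear", "Dresses", "Tops and Co-ord Sets"]
    else
      ["Western Wear", "Dresses", "Tops and Co-ord Sets"]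
  else
    if ["job", "interview", "office", "meeting", "work"].any (fun k => PySem.Str.isIn k event_type_lower) then
      ["Shirts"]
    else if ["wedding", "engagement", "reception", "marriage"].any (fun k => PySem.Str.isIn k event_type_lower) then
      ["Shirts"]
    else if ["party", "celebration", "night out", "club"].any (fun k => PySem.Str.isIn k event_type_lower) then
      ["Shirts", "T-shirts"]
    else if ["college", "daily", "casual", "university", "school"].any (fun k => PySem.Str.isIn k event_type_lower) then
      ["T-shirts", "Shirts"]
    else if ["festival", "diwali", "pongal", "eid", "onam", "traditional"].any (fun k => PySem.Str.isIn k event_type_lower) then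
      ["Shirts"]
    else if ["travel", "trip", "photoshoot", "vacation", "holiday"].any (fun k => PySem.Str.isIn k event_type_lower) then
      ["Shirts", "T-shirts"]
    else
      ["Shirts", "T-shirts"]

-- ===== PORT B =====
-- _entries(prio, cats, kws): a block of flat table entries sharing one (priority, categories)
def pvEntries (prio : Nat) (cats : List String) (kws : List String) : List (String × (Nat × List String)) :=
  kws.map (fun kw => (kw, (prio, cats)))

def pvWomenTable : List (String × (Nat × List String)) :=
  pvEntries 0 ["Western Wear", "Tops and Co-ord Sets", "Dresses"] ["job", "interview", "office", "meeting", "work"]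
  ++ pvEntries 1 ["Ethnic Wear", "Dresses"] ["wedding", "engagement", "reception", "marriage"]
  ++ pvEntries 2 ["Western Wear", "Dresses", "Tops and Co-ord Sets"] ["birthday", "party", "night out", "celebration", "club"]
  ++ pvEntries 3 ["Tops and Co-ord Sets", "Western Wear", "Dresses"] ["college", "daily", "casual", "university", "school"]
  ++ pvEntries 4 ["Ethnic Wear", "Dresses"] ["festival", "diwali", "pongal", "navratri", "eid", "onam", "traditional"]
  ++ pvEntries 5 ["Ethnic Wear", "Dresses"] ["family", "temple", "religious", "function"]
  ++ pvEntries 6 ["Western Wear", "Dresses", "Tops and Co-ord Sets"] ["travel", "trip", "photoshoot", "vacation", "holiday"]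

def pvWomenDefault : List String := ["Western Wear", "Dresses", "Tops and Co-ord Sets"]

def pvMenTable : List (String × (Nat × List String)) :=
  pvEntries 0 ["Shirts"] ["job", "interview", "office", "meeting", "work"]
  ++ pvEntries 1 ["Shirts"] ["wedding", "engagement", "reception", "marriage"]
  ++ pvEntries 2 ["Shirts", "T-shirts"] ["party", "celebration", "night out", "club"]
  ++ pvEntries 3 ["T-shirts", "Shirts"] ["college", "daily", "casual", "university", "school"]
  ++ pvEntries 4 ["Shirts"] ["festival", "diwali", "pongal", "eid", "onam", "traditional"]
  ++ pvEntries 5 ["Shirts", "T-shirts"] ["travel", "trip", "photoshoot", "vacation", "holiday"]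

def pvMenDefault : List String := ["Shirts", "T-shirts"]

-- body of B's for-loop: keep the matched entry of minimal priority
def pvStep (low : String) (best : Option (Nat × List String)) (p : String × (Nat × List String)) :
    Option (Nat × List String) :=
  if PySem.Str.isIn p.1 low &&
      (match best with | none => true | some x => decide (p.2.1 < x.1)) then
    some p.2
  else best

def get_event_categories_py_alt (gender : String) (event_type : String) : List String :=
  let low := PySem.Str.lower event_type
  let td := if gender == "women" then (pvWomenTable, pvWomenDefault) else (pvMenTable, pvMenDefault)
  let best := td.1.foldl (pvStep low) none
  match best with
  | some x => x.2
  | none => td.2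

-- ===== PRECONDITION & SPEC =====
def Spec_get_event_categories_py (gender : String) (event_type : String) (out : List String) : Prop := out = get_event_categories_py_alt gender event_type
instance (gender : String) (event_type : String) (out : List String) : Decidable (Spec_get_event_categories_py gender event_type out) := by unfold Spec_get_event_categories_py; infer_instance

-- ===== CLAIM (what is proved, stated in full; the proofs are below) =====
def Claim_equal_get_event_categories_py : Prop := ∀ (gender : String) (event_type : String), Dom_get_event_categories_py gender event_type → Spec_get_event_categories_py gender event_type (get_event_categories_py gender event_type)

-- ===== LEMMAS AND PROOFS =====

-- folding a block of entries onto an already-chosen best of priority ≤ prio leaves it unchanged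
theorem pv_fold_block_some (low : String) (kws : List String) (prio : Nat) (cats : List String)
    (x : Nat × List String) (h : ¬ prio < x.1) :
    (kws.map (fun kw => (kw, (prio, cats)))).foldl (pvStep low) (some x) = some x := by
  induction kws with
  | nil => rfl
  | cons k ks ih =>
      simp only [List.map_cons, List.foldl_cons, pvStep, h]
      by_cases hk : PySem.Str.isIn k low <;> simp only [hk] <;> simpa [h] using ih

-- folding a block of entries from none: some entry iff any keyword of the block matches
theorem pv_fold_block_none (low : String) (kws : List String) (prio : Nat) (cats : List String) :
    (pvEntries prio cats kws).foldl (pvStep low) none =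
      (if kws.any (fun k => PySem.Str.isIn k low) = true then some (prio, cats) else none) := by
  induction kws with
  | nil => rfl
  | cons k ks ih =>
      simp only [pvEntries, List.map_cons, List.foldl_cons, List.any_cons]
      by_cases hk : PySem.Str.isIn k low
      · simp only [pvStep, hk, Bool.true_and, Bool.true_or]
        exact pv_fold_block_some low ks prio cats (prio, cats) (lt_irrefl prio)
      · simp only [pvStep, hk, Bool.false_and, Bool.false_eq_true, if_false, Bool.false_or]
        simpa [pvEntries] using ih

-- ===== VERDICT (by name: the statement is the Claim_ definition above) =====
theorem get_event_categories_py_spec : Claim_equal_get_event_categories_py := by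
  intro gender event_type _
  unfold Spec_get_event_categories_py get_event_categories_py get_event_categories_py_alt
  dsimp only
  generalize PySem.Str.lower event_type = low
  by_cases hg : (gender == "women") = true
  · simp only [if_pos hg, pvWomenTable, pvWomenDefault, List.foldl_append]
    rw [pv_fold_block_none]
    by_cases h0 : (["job", "interview", "office", "meeting", "work"] : List String).any (fun k => PySem.Str.isIn k low) = true
    · simp only [if_pos h0]; simp [pvEntries, pvStep]
    · simp only [if_neg h0]
      rw [pv_fold_block_none]
      by_cases h1 : (["wedding", "engagement", "reception", "marriage"] : List String).any (fun k => PySem.Str.isIn k low) = true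
      · simp only [if_pos h1]; simp [pvEntries, pvStep]
      · simp only [if_neg h1]
        rw [pv_fold_block_none]
        by_cases h2 : (["birthday", "party", "night out", "celebration", "club"] : List String).any (fun k => PySem.Str.isIn k low) = true
        · simp only [if_pos h2]; simp [pvEntries, pvStep]
        · simp only [if_neg h2]
          rw [pv_fold_block_none]
          by_cases h3 : (["college", "daily", "casual", "university", "school"] : List String).any (fun k => PySem.Str.isIn k low) = true
          · simp only [if_pos h3]; simp [pvEntries, pvStep]
          · simp only [if_neg h3]
            rw [pv_fold_block_none]
            by_cases h4 : (["festival", "diwali", "pongal", "navratri", "eid", "onam", "traditional"] : List String).any (fun k => PySem.Str.isIn k low) = true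
            · simp only [if_pos h4]; simp [pvEntries, pvStep]
            · simp only [if_neg h4]
              rw [pv_fold_block_none]
              by_cases h5 : (["family", "temple", "religious", "function"] : List String).any (fun k => PySem.Str.isIn k low) = true
              · simp only [if_pos h5]; simp [pvEntries, pvStep]
              · simp only [if_neg h5]
                rw [pv_fold_block_none]
                by_cases h6 : (["travel", "trip", "photoshoot", "vacation", "holiday"] : List String).any (fun k => PySem.Str.isIn k low) = true
                · simp only [if_pos h6]
                · simp only [if_neg h6]
  · simp only [if_neg hg, pvMenTable, pvMenDefault, List.foldl_append]
    rw [pv_fold_block_none]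
    by_cases h0 : (["job", "interview", "office", "meeting", "work"] : List String).any (fun k => PySem.Str.isIn k low) = true
    · simp only [if_pos h0]; simp [pvEntries, pvStep]
    · simp only [if_neg h0]
      rw [pv_fold_block_none]
      by_cases h1 : (["wedding", "engagement", "reception", "marriage"] : List String).any (fun k => PySem.Str.isIn k low) = true
      · simp only [if_pos h1]; simp [pvEntries, pvStep]
      · simp only [if_neg h1]
        rw [pv_fold_block_none]
        by_cases h2 : (["party", "celebration", "night out", "club"] : List String).any (fun k => PySem.Str.isIn k low) = true
        · simp only [if_pos h2]; simp [pvEntries, pvStep]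
        · simp only [if_neg h2]
          rw [pv_fold_block_none]
          by_cases h3 : (["college", "daily", "casual", "university", "school"] : List String).any (fun k => PySem.Str.isIn k low) = true
          · simp only [if_pos h3]; simp [pvEntries, pvStep]
          · simp only [if_neg h3]
            rw [pv_fold_block_none]
            by_cases h4 : (["festival", "diwali", "pongal", "eid", "onam", "traditional"] : List String).any (fun k => PySem.Str.isIn k low) = true
            · simp only [if_pos h4]; simp [pvEntries, pvStep]
            · simp only [if_neg h4]
              rw [pv_fold_block_none]
              by_cases h5 : (["travel", "trip", "photoshoot", "vacation", "holiday"] : List String).any (fun k => PySem.Str.isIn k low) = true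
              · simp only [if_pos h5]
              · simp only [if_neg h5]
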